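-- pv_equiv track=rewrite | github.com/inganault/crengine | crengine/Tools/lstm_convert/lstm_converter.py | coalesce_dict
-- ===== SOURCE A (Python) =====
-- def coalesce_dict(dic):
--     kv = sorted(dic.items())
--     key_start = -2
--     value_start = -2
--     block_length = 0
--     ranges = []
--     for k, v in kv:
--         k = ord(k)
--         if (key_start + block_length == k and
--            value_start + block_length == v):
--             # continuous
--             block_length += 1
--         else:
--             if block_length != 0:
--                 ranges += [(key_start, value_start, block_length)]
--             key_start, value_start = k, v
--             block_length = 1
--     if block_length != 0:
--         ranges += [(key_start, value_start, block_length)]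
--     return ranges
-- ===== SOURCE B (Python) =====
-- def coalesce_dict(dic):
--     kv = sorted(dic.items())
--     n = len(kv)
--     ranges = []
--     i = 0
--     while i < n:
--         k0 = ord(kv[i][0])
--         v0 = kv[i][1]
--         j = i + 1
--         while j < n and ord(kv[j][0]) - k0 == j - i and kv[j][1] - v0 == j - i:
--             j += 1
--         ranges.append((k0, v0, j - i))
--         i = j
--     return ranges
-- ===== Notes on version B (the rewrite author's own statement) =====
-- stated objective: alternative
-- what changed: Replaces A's single-pass state machine (sentinel start values, running block counters and a trailing flush) with a two-pointer run-extraction loop: for each run start i an inner scan finds the end j of the maximal lockstep run, emitting (ord(k),v,j-i) directly with no sentinels and no final flush.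
import Mathlib
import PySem

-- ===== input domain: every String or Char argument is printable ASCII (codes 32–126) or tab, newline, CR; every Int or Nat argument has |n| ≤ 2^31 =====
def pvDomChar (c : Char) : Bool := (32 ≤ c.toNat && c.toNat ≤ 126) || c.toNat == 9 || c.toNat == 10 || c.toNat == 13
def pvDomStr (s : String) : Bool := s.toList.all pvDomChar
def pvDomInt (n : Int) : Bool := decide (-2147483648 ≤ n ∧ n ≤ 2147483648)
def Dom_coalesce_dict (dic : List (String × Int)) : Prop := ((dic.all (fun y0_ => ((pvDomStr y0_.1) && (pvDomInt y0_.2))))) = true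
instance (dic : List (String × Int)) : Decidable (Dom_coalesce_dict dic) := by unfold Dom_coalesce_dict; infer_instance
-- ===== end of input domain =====

-- B replaces A's sentinel/state-machine fold (running block counters + trailing flush) by a
-- two-pointer run extraction (inner scan finds each maximal lockstep run, emitted directly);
-- same cost, no sentinels, no final flush.


-- ===== PORT A =====
-- ord(k) for a one-character string (Pre_ guarantees the length; exact there)
def pyOrd (s : String) : Int := ((s.toList.headD ' ').toNat : Int)

-- the body of A's for-loop; state = (key_start, value_start, block_length, ranges)
def cdStep (st : Int × Int × Int × List (Int × Int × Int)) (p : String × Int) :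
    Int × Int × Int × List (Int × Int × Int) :=
  let k := pyOrd p.1
  let v := p.2
  if st.1 + st.2.2.1 = k ∧ st.2.1 + st.2.2.1 = v then
    (st.1, st.2.1, st.2.2.1 + 1, st.2.2.2)
  else
    (k, v, 1, if st.2.2.1 ≠ 0 then st.2.2.2 ++ [(st.1, st.2.1, st.2.2.1)] else st.2.2.2)

-- A's trailing 'if block_length != 0: ranges += [...]'
def cdFlush (st : Int × Int × Int × List (Int × Int × Int)) : List (Int × Int × Int) :=
  if st.2.2.1 ≠ 0 then st.2.2.2 ++ [(st.1, st.2.1, st.2.2.1)] else st.2.2.2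

def coalesce_dict (dic : List (String × Int)) : List (Int × Int × Int) :=
  cdFlush ((PySem.List.sorted2 dic (fun p => p.1) (fun p => p.2)).foldl cdStep (-2, -2, 0, []))

-- ===== PORT B =====
-- B's inner while loop: d plays the role of j - i; returns the final j - i (run length)
def cdInner (k0 v0 : Int) (d : Int) : List (String × Int) → Int
  | [] => d
  | p :: t => if pyOrd p.1 - k0 = d ∧ p.2 - v0 = d then cdInner k0 v0 (d + 1) t else d

-- B's outer while loop over run starts; the suffix from index i plays the role of i
def cdOuter : List (String × Int) → List (Int × Int × Int)
  | [] => []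
  | p :: t =>
    let d := cdInner (pyOrd p.1) p.2 1 t
    (pyOrd p.1, p.2, d) :: cdOuter (t.drop (d - 1).toNat)
termination_by xs => xs.length
decreasing_by simp

def coalesce_dict_alt (dic : List (String × Int)) : List (Int × Int × Int) :=
  cdOuter (PySem.List.sorted2 dic (fun p => p.1) (fun p => p.2))

-- ===== PRECONDITION & SPEC =====
-- Pre_ excludes exactly the inputs on which A raises: ord(k) raises TypeError unless every key
-- is a single character.
def Pre_coalesce_dict (dic : List (String × Int)) : Prop :=
  ∀ p ∈ dic, p.1.toList.length = 1
instance (dic : List (String × Int)) : Decidable (Pre_coalesce_dict dic) := by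
  unfold Pre_coalesce_dict; infer_instance

def pvWitness_coalesce_dict : (List (String × Int)) := [("a", 5), ("b", 6), ("d", 1)]

def Spec_coalesce_dict (dic : List (String × Int)) (out : List (Int × Int × Int)) : Prop := out = coalesce_dict_alt dic
instance (dic : List (String × Int)) (out : List (Int × Int × Int)) : Decidable (Spec_coalesce_dict dic out) := by unfold Spec_coalesce_dict; infer_instance

-- ===== CLAIM (what is proved, stated in full; the proofs are below) =====
def Claim_equal_coalesce_dict : Prop := ∀ (dic : List (String × Int)), Dom_coalesce_dict dic → Pre_coalesce_dict dic → Spec_coalesce_dict dic (coalesce_dict dic)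

-- ===== LEMMAS AND PROOFS =====

-- A's loop, written as a structural recursion (proof-only intermediate)
def goA (ks vs bl : Int) : List (String × Int) → List (Int × Int × Int)
  | [] => [(ks, vs, bl)]
  | p :: t =>
    if ks + bl = pyOrd p.1 ∧ vs + bl = p.2 then goA ks vs (bl + 1) t
    else (ks, vs, bl) :: goA (pyOrd p.1) p.2 1 t

theorem cdOuter_nil : cdOuter [] = [] := by
  rw [cdOuter]

theorem cdOuter_cons (p : String × Int) (t : List (String × Int)) :
    cdOuter (p :: t) =
      (pyOrd p.1, p.2, cdInner (pyOrd p.1) p.2 1 t)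
        :: cdOuter (t.drop (cdInner (pyOrd p.1) p.2 1 t - 1).toNat) := by
  rw [cdOuter]

theorem pyOrd_nonneg (s : String) : 0 ≤ pyOrd s := by
  simp [pyOrd]

theorem cdInner_ge (t : List (String × Int)) (k0 v0 : Int) :
    ∀ d : Int, d ≤ cdInner k0 v0 d t := by
  induction t with
  | nil => intro d; simp [cdInner]
  | cons p t ih =>
    intro d
    simp only [cdInner]
    split
    · exact le_trans (by omega) (ih (d + 1))
    · exact le_refl d

theorem fold_eq_goA (xs : List (String × Int)) :
    ∀ (ks vs bl : Int) (rs : List (Int × Int × Int)), 0 < bl →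
      cdFlush (xs.foldl cdStep (ks, vs, bl, rs)) = rs ++ goA ks vs bl xs := by
  induction xs with
  | nil =>
    intro ks vs bl rs hbl
    simp [cdFlush, goA]
    omega
  | cons p t ih =>
    intro ks vs bl rs hbl
    by_cases h : ks + bl = pyOrd p.1 ∧ vs + bl = p.2
    · simp only [List.foldl_cons, cdStep, goA, h]
      exact ih ks vs (bl + 1) rs (by omega)
    · simp only [List.foldl_cons, cdStep, goA, if_neg h]
      rw [if_pos (show bl ≠ 0 by omega)]
      rw [ih (pyOrd p.1) p.2 1 (rs ++ [(ks, vs, bl)]) (by omega)]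
      simp

theorem goA_eq_cdOuter (t : List (String × Int)) :
    ∀ (ks vs bl : Int), 0 < bl →
      goA ks vs bl t =
        (ks, vs, cdInner ks vs bl t) :: cdOuter (t.drop (cdInner ks vs bl t - bl).toNat) := by
  induction t with
  | nil => intro ks vs bl _; simp [goA, cdInner, cdOuter_nil]
  | cons p t ih =>
    intro ks vs bl hbl
    by_cases h : ks + bl = pyOrd p.1 ∧ vs + bl = p.2
    · have h' : pyOrd p.1 - ks = bl ∧ p.2 - vs = bl := by omega
      simp only [goA, cdInner, if_pos h, if_pos h']
      rw [ih ks vs (bl + 1) (by omega)]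
      have hD := cdInner_ge t ks vs (bl + 1)
      have heq : (cdInner ks vs (bl + 1) t - bl).toNat
          = (cdInner ks vs (bl + 1) t - (bl + 1)).toNat + 1 := by omega
      rw [heq, List.drop_succ_cons]
    · have h' : ¬ (pyOrd p.1 - ks = bl ∧ p.2 - vs = bl) := by omega
      simp only [goA, cdInner, if_neg h, if_neg h']
      have : (bl - bl).toNat = 0 := by omega
      rw [this, List.drop_zero]
      rw [cdOuter_cons]
      congr 1
      exact ih (pyOrd p.1) p.2 1 (by omega)

theorem ports_agree (xs : List (String × Int)) :
    cdFlush (xs.foldl cdStep (-2, -2, 0, [])) = cdOuter xs := by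
  cases xs with
  | nil => simp [cdFlush, cdOuter_nil]
  | cons p t =>
    have hne : ¬ ((-2 : Int) + 0 = pyOrd p.1 ∧ (-2 : Int) + 0 = p.2) := by
      intro ⟨h1, _⟩
      have := pyOrd_nonneg p.1
      omega
    simp only [List.foldl_cons, cdStep, if_neg hne]
    norm_num
    rw [fold_eq_goA t (pyOrd p.1) p.2 1 [] (by omega)]
    rw [goA_eq_cdOuter t (pyOrd p.1) p.2 1 (by omega)]
    rw [cdOuter_cons]
    simp

-- ===== VERDICT (by name: the statement is the Claim_ definition above) =====
theorem coalesce_dict_spec : Claim_equal_coalesce_dict := by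
  intro dic _ _
  unfold Spec_coalesce_dict coalesce_dict coalesce_dict_alt
  exact ports_agree _
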